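-- pv_equiv track=rewrite | github.com/sueszli/vector-database-benchmark | dataset/python-mutated/jumptable_utils.py | _mk_buckets
-- ===== SOURCE A (Python) =====
-- def _mk_buckets(method_ids, n_buckets):
--     if False:
--         i = 10
--         return i + 15
--     buckets = {}
--     for x in method_ids:
--         t = x % n_buckets
--         buckets.setdefault(t, [])
--         buckets[t].append(x)
--     return buckets
-- ===== SOURCE B (Python) =====
-- def _mk_buckets(method_ids, n_buckets):
--     residues = []
--     for x in method_ids:
--         r = x % n_buckets
--         if r not in residues:
--             residues.append(r)
--     return {r: [x for x in method_ids if x % n_buckets == r] for r in residues}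
-- ===== Notes on version B (the rewrite author's own statement) =====
-- stated objective: alternative
-- what changed: A builds the dict in one pass with setdefault/append; B first collects the distinct residues in order of first appearance, then builds each bucket with a separate filter pass over the input.
import Mathlib
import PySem

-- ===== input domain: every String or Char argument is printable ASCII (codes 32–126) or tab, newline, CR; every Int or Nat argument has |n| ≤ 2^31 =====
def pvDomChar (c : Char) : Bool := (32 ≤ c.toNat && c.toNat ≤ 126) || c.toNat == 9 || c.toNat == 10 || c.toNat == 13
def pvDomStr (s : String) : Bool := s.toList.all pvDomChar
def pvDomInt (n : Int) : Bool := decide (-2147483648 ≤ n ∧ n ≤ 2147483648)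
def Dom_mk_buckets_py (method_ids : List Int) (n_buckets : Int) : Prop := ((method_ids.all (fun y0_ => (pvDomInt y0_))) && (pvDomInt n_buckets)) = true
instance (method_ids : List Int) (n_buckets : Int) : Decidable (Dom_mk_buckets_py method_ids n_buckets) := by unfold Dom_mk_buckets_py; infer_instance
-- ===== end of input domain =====

-- B replaces A's single-pass dict-accumulation by a residue-list pass followed by one filter
-- per residue (alternative decomposition, same results; not claimed faster).

-- ===== PORT A =====
-- literal transliteration of _mk_buckets (the `if False:` branch is dead code and ports to nothing)
def mk_buckets_py (method_ids : List Int) (n_buckets : Int) : List (Int × List Int) :=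
  (method_ids.foldl
    (fun buckets x =>
      let t := PySem.Int.mod x n_buckets
      (buckets.setdefault t []).modify t [] (· ++ [x]))
    PySem.Dict.empty).items

-- ===== PORT B =====
def mk_buckets_py_alt (method_ids : List Int) (n_buckets : Int) : List (Int × List Int) :=
  let residues := method_ids.foldl
    (fun rs x =>
      let r := PySem.Int.mod x n_buckets
      if r ∈ rs then rs else rs ++ [r]) []
  residues.map (fun r => (r, method_ids.filter (fun x => PySem.Int.mod x n_buckets == r)))

-- ===== PRECONDITION & SPEC =====
-- Pre_ excludes exactly the inputs where Python raises ZeroDivisionError: n_buckets = 0 with a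
-- nonempty list (with an empty list the loop body never runs and A returns {}).
def Pre_mk_buckets_py (method_ids : List Int) (n_buckets : Int) : Prop :=
  method_ids = [] ∨ n_buckets ≠ 0
instance (method_ids : List Int) (n_buckets : Int) : Decidable (Pre_mk_buckets_py method_ids n_buckets) := by unfold Pre_mk_buckets_py; infer_instance
def pvWitness_mk_buckets_py : List Int × Int := ([3, 1, 4, 7, -2], 3)

def Spec_mk_buckets_py (method_ids : List Int) (n_buckets : Int) (out : List (Int × List Int)) : Prop := out = mk_buckets_py_alt method_ids n_buckets
instance (method_ids : List Int) (n_buckets : Int) (out : List (Int × List Int)) : Decidable (Spec_mk_buckets_py method_ids n_buckets out) := by unfold Spec_mk_buckets_py; infer_instance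

-- ===== CLAIM (what is proved, stated in full; the proofs are below) =====
def Claim_equal_mk_buckets_py : Prop := ∀ (method_ids : List Int) (n_buckets : Int), Dom_mk_buckets_py method_ids n_buckets → Pre_mk_buckets_py method_ids n_buckets → Spec_mk_buckets_py method_ids n_buckets (mk_buckets_py method_ids n_buckets)

-- ===== LEMMAS AND PROOFS =====

-- A's loop body: the setdefault before the append is absorbed by `modify`.
theorem stepA_eq_modify (n x : Int) (d : PySem.Dict Int (List Int)) :
    (d.setdefault (PySem.Int.mod x n) []).modify (PySem.Int.mod x n) [] (· ++ [x])
      = d.modify (PySem.Int.mod x n) [] (· ++ [x]) := by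
  by_cases h : d.contains (PySem.Int.mod x n) = true
  · rw [PySem.Dict.setdefault_of_contains d _ h]
  · simp only [Bool.not_eq_true] at h
    rw [PySem.Dict.setdefault_of_not_contains d _ h]
    simp [PySem.Dict.modify, PySem.Dict.getD_insert_self, PySem.Dict.insert_insert_self,
      PySem.Dict.getD_of_not_contains d _ h]

-- A's whole fold, written with `modify` only.
theorem foldA_eq_foldModify (method_ids : List Int) (n : Int) :
    method_ids.foldl
      (fun buckets x =>
        let t := PySem.Int.mod x n
        (buckets.setdefault t []).modify t [] (· ++ [x])) PySem.Dict.empty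
    = method_ids.foldl
        (fun d x => d.modify (PySem.Int.mod x n) [] (· ++ [x])) PySem.Dict.empty := by
  have h : (fun (buckets : PySem.Dict Int (List Int)) (x : Int) =>
      let t := PySem.Int.mod x n
      (buckets.setdefault t []).modify t [] (· ++ [x]))
      = fun d x => d.modify (PySem.Int.mod x n) [] (· ++ [x]) := by
    funext d x
    exact stepA_eq_modify n x d
  rw [h]

-- B's residue loop is PySem.Set.ofList of the residues.
theorem residues_eq_ofList (method_ids : List Int) (n : Int) :
    method_ids.foldl
      (fun rs x =>
        let r := PySem.Int.mod x n
        if r ∈ rs then rs else rs ++ [r]) []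
    = PySem.Set.ofList (method_ids.map (fun x => PySem.Int.mod x n)) := by
  rw [← PySem.Set.update_nil_left, PySem.Set.update_map_eq_foldl_add]
  have h : (fun (rs : List Int) (x : Int) =>
      let r := PySem.Int.mod x n
      if r ∈ rs then rs else rs ++ [r])
      = fun (s : PySem.Set Int) x => s.add (PySem.Int.mod x n) := by
    funext s x
    simp [PySem.Set.add]
  rw [h]

-- the bucket for residue c, read off the modify-fold
theorem getD_foldModify (method_ids : List Int) (n c : Int) :
    (method_ids.foldl
        (fun d x => d.modify (PySem.Int.mod x n) [] (· ++ [x])) PySem.Dict.empty).getD c []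
      = method_ids.filter (fun x => PySem.Int.mod x n == c) := by
  have h := PySem.Dict.getD_foldl_modify_append
    (method_ids.map (fun x => (PySem.Int.mod x n, x))) (PySem.Dict.empty (κ := Int) (ν := List Int)) c
  rw [List.foldl_map] at h
  simpa [List.filter_map, Function.comp_def, List.map_map] using h

-- ===== VERDICT (by name: the statement is the Claim_ definition above) =====
theorem mk_buckets_py_spec : Claim_equal_mk_buckets_py := by
  intro method_ids n _ _
  unfold Spec_mk_buckets_py mk_buckets_py mk_buckets_py_alt
  rw [foldA_eq_foldModify, residues_eq_ofList]
  set key := fun x : Int => PySem.Int.mod x n with hkey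
  have hkeys : (method_ids.foldl
      (fun d x => d.modify (key x) [] (· ++ [x])) PySem.Dict.empty).keys
      = PySem.Set.ofList (method_ids.map key) := by
    rw [PySem.Dict.keys_foldl_modify_key method_ids key [] (fun _ x v => v ++ [x])]
    simp [PySem.Dict.keys_empty, PySem.Set.update_nil_left]
  have hnd : (method_ids.foldl
      (fun d x => d.modify (key x) [] (· ++ [x])) PySem.Dict.empty).keys.Nodup :=
    PySem.Dict.nodup_keys_foldl_modify_key method_ids key [] (fun _ x v => v ++ [x]) _
      PySem.Dict.nodup_keys_empty
  rw [PySem.Dict.items_eq_map_keys _ hnd [], hkeys]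
  apply List.map_congr_left
  intro r _
  exact congrArg (fun l => (r, l)) (getD_foldModify method_ids n r)
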